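-- pv_equiv track=rewrite | github.com/dr3d/prethinker | scripts/run_story_stress_cycle.py | _resolve_temporal_modes
-- ===== SOURCE A (Python) =====
-- def _resolve_temporal_modes(text: str) -> list[bool]:
--     out: list[bool] = []
--     for raw in str(text or "").split(","):
--         token = raw.strip().lower()
--         if token in {"on", "true", "1", "temporal"} and True not in out:
--             out.append(True)
--         if token in {"off", "false", "0", "plain"} and False not in out:
--             out.append(False)
--     return out
-- ===== SOURCE B (Python) =====
-- _TRUE_TOKENS = {"on", "true", "1", "temporal"}
-- _FALSE_TOKENS = {"off", "false", "0", "plain"}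
--
--
-- def _resolve_temporal_modes(text: str) -> list[bool]:
--     # No accumulator scan: normalize once, then find the first position of a
--     # true-token and of a false-token independently, and assemble the answer
--     # by case analysis on those two positions.
--     tokens = [raw.strip().lower() for raw in str(text or "").split(",")]
--     ti = next((i for i, t in enumerate(tokens) if t in _TRUE_TOKENS), None)
--     fi = next((i for i, t in enumerate(tokens) if t in _FALSE_TOKENS), None)
--     if ti is None and fi is None:
--         return []
--     if fi is None:
--         return [True]
--     if ti is None:
--         return [False]
--     return [True, False] if ti < fi else [False, True]
-- ===== Notes on version B (the rewrite author's own statement) =====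
-- stated objective: alternative
-- what changed: Replaces A's stateful fold (appending to the output while checking membership on it) with two independent first-occurrence index searches over the normalized token list and a closed-form case analysis on the two indices.
import Mathlib
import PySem

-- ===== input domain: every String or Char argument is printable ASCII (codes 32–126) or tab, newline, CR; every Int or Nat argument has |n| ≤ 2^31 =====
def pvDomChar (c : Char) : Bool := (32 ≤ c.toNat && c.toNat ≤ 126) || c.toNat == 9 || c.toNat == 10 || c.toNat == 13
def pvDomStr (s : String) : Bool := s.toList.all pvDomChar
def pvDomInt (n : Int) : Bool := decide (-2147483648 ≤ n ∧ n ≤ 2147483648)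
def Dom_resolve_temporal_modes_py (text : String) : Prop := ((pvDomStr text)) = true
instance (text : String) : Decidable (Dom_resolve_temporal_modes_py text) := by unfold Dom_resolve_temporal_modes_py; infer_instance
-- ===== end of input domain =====

-- B replaces A's stateful fold with two independent first-occurrence index
-- searches over the normalized tokens plus a case analysis. Objective: alternative.


-- ===== PORT A =====
def resolve_temporal_modes_py (text : String) : List Bool :=
  let t := if text == "" then "" else text      -- str(text or "")
  ((PySem.Str.split? t ",").getD []).foldl (fun out raw =>
    let token := PySem.Str.lower (PySem.Str.strip raw)
    let out :=
      if token ∈ (["on", "true", "1", "temporal"] : List String) ∧ true ∉ out then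
        out ++ [true]
      else out
    if token ∈ (["off", "false", "0", "plain"] : List String) ∧ false ∉ out then
      out ++ [false]
    else out) []

-- ===== PORT B =====
def resolve_temporal_modes_py_alt (text : String) : List Bool :=
  let t := if text == "" then "" else text      -- str(text or "")
  let tokens := ((PySem.Str.split? t ",").getD []).map
    (fun raw => PySem.Str.lower (PySem.Str.strip raw))
  let ti := tokens.findIdx? (fun tok => (["on", "true", "1", "temporal"] : List String).contains tok)
  let fi := tokens.findIdx? (fun tok => (["off", "false", "0", "plain"] : List String).contains tok)
  match ti, fi with
  | none, none => []
  | some _, none => [true]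
  | none, some _ => [false]
  | some i, some j => if i < j then [true, false] else [false, true]

-- ===== PRECONDITION & SPEC =====
def Spec_resolve_temporal_modes_py (text : String) (out : List Bool) : Prop := out = resolve_temporal_modes_py_alt text
instance (text : String) (out : List Bool) : Decidable (Spec_resolve_temporal_modes_py text out) := by unfold Spec_resolve_temporal_modes_py; infer_instance

-- ===== CLAIM (what is proved, stated in full; the proofs are below) =====
def Claim_equal_resolve_temporal_modes_py : Prop := ∀ (text : String), Dom_resolve_temporal_modes_py text → Spec_resolve_temporal_modes_py text (resolve_temporal_modes_py text)

-- ===== LEMMAS AND PROOFS =====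

/-- A's loop, rephrased over the already-normalized token list. -/
def pvLoopA (toks : List String) (out : List Bool) : List Bool :=
  toks.foldl (fun out tok =>
    let out :=
      if tok ∈ (["on", "true", "1", "temporal"] : List String) ∧ true ∉ out then
        out ++ [true]
      else out
    if tok ∈ (["off", "false", "0", "plain"] : List String) ∧ false ∉ out then
      out ++ [false]
    else out) out

def pvIsT (tok : String) : Bool := (["on", "true", "1", "temporal"] : List String).contains tok
def pvIsF (tok : String) : Bool := (["off", "false", "0", "plain"] : List String).contains tok

lemma pvTF_disjoint (s : String)
    (h : s ∈ (["on", "true", "1", "temporal"] : List String)) :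
    s ∉ (["off", "false", "0", "plain"] : List String) := by
  rcases (by simpa using h) with rfl | rfl | rfl | rfl <;> decide

lemma pvLoopA_cons (tok : String) (toks : List String) (out : List Bool) :
    pvLoopA (tok :: toks) out =
      pvLoopA toks
        (let out :=
          if tok ∈ (["on", "true", "1", "temporal"] : List String) ∧ true ∉ out then
            out ++ [true]
          else out
         if tok ∈ (["off", "false", "0", "plain"] : List String) ∧ false ∉ out then
           out ++ [false]
         else out) := rfl

/-- Saturated states are fixed points of A's loop. -/
lemma pvLoopA_TF (toks : List String) : pvLoopA toks [true, false] = [true, false] := by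
  induction toks with
  | nil => rfl
  | cons tok toks ih => rw [pvLoopA_cons]; simpa using ih

lemma pvLoopA_FT (toks : List String) : pvLoopA toks [false, true] = [false, true] := by
  induction toks with
  | nil => rfl
  | cons tok toks ih => rw [pvLoopA_cons]; simpa using ih

/-- From state [true] A only waits for the first false-token. -/
lemma pvLoopA_T (toks : List String) :
    pvLoopA toks [true] =
      match toks.findIdx? pvIsF with
      | none => [true]
      | some _ => [true, false] := by
  induction toks with
  | nil => rfl
  | cons tok toks ih =>
    rw [pvLoopA_cons, List.findIdx?_cons]
    by_cases hF : tok ∈ (["off", "false", "0", "plain"] : List String)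
    · have hFb : pvIsF tok = true := by simpa [pvIsF, List.contains_eq_mem] using hF
      simp only [hFb, if_pos, hF, true_and]
      simpa using pvLoopA_TF toks
    · have hFb : pvIsF tok = false := by simpa [pvIsF, List.contains_eq_mem] using hF
      simp only [hFb, Bool.false_eq_true, if_false, hF, false_and]
      have hstate : (if tok ∈ (["on", "true", "1", "temporal"] : List String) ∧
          true ∉ ([true] : List Bool) then ([true] : List Bool) ++ [true] else [true]) = [true] := by
        simp
      simp only [hstate, ih]
      cases toks.findIdx? pvIsF <;> simp

/-- From state [false] A only waits for the first true-token. -/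
lemma pvLoopA_F (toks : List String) :
    pvLoopA toks [false] =
      match toks.findIdx? pvIsT with
      | none => [false]
      | some _ => [false, true] := by
  induction toks with
  | nil => rfl
  | cons tok toks ih =>
    rw [pvLoopA_cons, List.findIdx?_cons]
    by_cases hT : tok ∈ (["on", "true", "1", "temporal"] : List String)
    · have hTb : pvIsT tok = true := by simpa [pvIsT, List.contains_eq_mem] using hT
      have hF := pvTF_disjoint tok hT
      simp only [hTb, if_pos]
      have hstate : (if tok ∈ (["on", "true", "1", "temporal"] : List String) ∧
          true ∉ ([false] : List Bool) then ([false] : List Bool) ++ [true] else [false]) = [false, true] := by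
        simp [hT]
      simp only [hstate]
      have h2 : (if tok ∈ (["off", "false", "0", "plain"] : List String) ∧
          false ∉ ([false, true] : List Bool) then ([false, true] : List Bool) ++ [false] else [false, true]) = [false, true] := by
        simp
      simp only [h2]
      exact pvLoopA_FT toks
    · have hTb : pvIsT tok = false := by simpa [pvIsT, List.contains_eq_mem] using hT
      simp only [hTb, Bool.false_eq_true, if_false, hT, false_and]
      have hstate : (if tok ∈ (["off", "false", "0", "plain"] : List String) ∧
          false ∉ ([false] : List Bool) then ([false] : List Bool) ++ [false] else [false]) = [false] := by
        simp
      simp only [hstate, ih]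
      cases toks.findIdx? pvIsT <;> simp

/-- A's loop from the empty state, characterized by the two first-occurrence indices. -/
lemma pvLoopA_nilState (toks : List String) :
    pvLoopA toks [] =
      match toks.findIdx? pvIsT, toks.findIdx? pvIsF with
      | none, none => []
      | some _, none => [true]
      | none, some _ => [false]
      | some i, some j => if i < j then [true, false] else [false, true] := by
  induction toks with
  | nil => rfl
  | cons tok toks ih =>
    rw [pvLoopA_cons, List.findIdx?_cons, List.findIdx?_cons]
    by_cases hT : tok ∈ (["on", "true", "1", "temporal"] : List String)
    · have hTb : pvIsT tok = true := by simpa [pvIsT, List.contains_eq_mem] using hT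
      have hF := pvTF_disjoint tok hT
      have hFb : pvIsF tok = false := by simpa [pvIsF, List.contains_eq_mem] using hF
      simp only [hTb, hFb, if_pos, Bool.false_eq_true, if_false]
      have h1 : (if tok ∈ (["on", "true", "1", "temporal"] : List String) ∧
          true ∉ ([] : List Bool) then ([] : List Bool) ++ [true] else []) = [true] := by
        simp [hT]
      simp only [h1]
      have h2 : (if tok ∈ (["off", "false", "0", "plain"] : List String) ∧
          false ∉ ([true] : List Bool) then ([true] : List Bool) ++ [false] else [true]) = [true] := by
        simp [hF]
      simp only [h2, pvLoopA_T toks]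
      cases toks.findIdx? pvIsF <;> simp
    · have hTb : pvIsT tok = false := by simpa [pvIsT, List.contains_eq_mem] using hT
      by_cases hF : tok ∈ (["off", "false", "0", "plain"] : List String)
      · have hFb : pvIsF tok = true := by simpa [pvIsF, List.contains_eq_mem] using hF
        simp only [hTb, hFb, if_pos, Bool.false_eq_true, if_false]
        have h1 : (if tok ∈ (["on", "true", "1", "temporal"] : List String) ∧
            true ∉ ([] : List Bool) then ([] : List Bool) ++ [true] else []) = [] := by
          simp [hT]
        simp only [h1]
        have h2 : (if tok ∈ (["off", "false", "0", "plain"] : List String) ∧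
            false ∉ ([] : List Bool) then ([] : List Bool) ++ [false] else []) = [false] := by
          simp [hF]
        simp only [h2, pvLoopA_F toks]
        cases toks.findIdx? pvIsT <;> simp
      · have hFb : pvIsF tok = false := by simpa [pvIsF, List.contains_eq_mem] using hF
        simp only [hTb, hFb, Bool.false_eq_true, if_false]
        have h1 : (if tok ∈ (["on", "true", "1", "temporal"] : List String) ∧
            true ∉ ([] : List Bool) then ([] : List Bool) ++ [true] else []) = [] := by
          simp [hT]
        simp only [h1]
        have h2 : (if tok ∈ (["off", "false", "0", "plain"] : List String) ∧
            false ∉ ([] : List Bool) then ([] : List Bool) ++ [false] else []) = [] := by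
          simp [hF]
        simp only [h2, ih]
        cases toks.findIdx? pvIsT <;> cases toks.findIdx? pvIsF <;> simp

-- ===== VERDICT (by name: the statement is the Claim_ definition above) =====
theorem resolve_temporal_modes_py_spec : Claim_equal_resolve_temporal_modes_py := by
  intro text _
  unfold Spec_resolve_temporal_modes_py resolve_temporal_modes_py resolve_temporal_modes_py_alt
  have hmap : ∀ (raws : List String),
      raws.foldl (fun out raw =>
        let token := PySem.Str.lower (PySem.Str.strip raw)
        let out :=
          if token ∈ (["on", "true", "1", "temporal"] : List String) ∧ true ∉ out then
            out ++ [true]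
          else out
        if token ∈ (["off", "false", "0", "plain"] : List String) ∧ false ∉ out then
          out ++ [false]
        else out) []
      = pvLoopA (raws.map (fun raw => PySem.Str.lower (PySem.Str.strip raw))) [] := by
    intro raws
    unfold pvLoopA
    rw [List.foldl_map]
  rw [hmap, pvLoopA_nilState]
  rfl
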